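-- pv_equiv track=rewrite | github.com/sncf-connect-tech/xcanalyzer | xcanalyzer/xcodeproject/parsers.py | _reduce_double_dot_filepath_part
-- ===== SOURCE A (Python) =====
-- def _reduce_double_dot_filepath_part(filepath):
--     new_parts = []
--     parts = filepath.split('/')
--
--     # Last part: filename
--     new_parts.append(parts.pop())
--
--     double_dot_count = 0
--
--     while parts:
--         part = parts.pop()  # Right most part
--
--         if part == '..':
--             double_dot_count += 1
--
--             # Check that previous parts are sufficiently numerous
--             assert double_dot_count <= len(parts)
--         elif double_dot_count != 0:
--             double_dot_count -= 1
--         else: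
--             new_parts.append(part)
--
--     new_parts.reverse()
--     return '/'.join(new_parts)
-- ===== SOURCE B (Python) =====
-- def _reduce_double_dot_filepath_part(filepath):
--     parts = filepath.split('/')
--     filename = parts[-1]  # last part kept literally (even '' or '..')
--     stack = []
--     for part in parts[:-1]:
--         if part == '..':
--             assert stack
--             stack.pop()
--         else:
--             stack.append(part)
--     return '/'.join(stack + [filename])
-- ===== Notes on version B (the rewrite author's own statement) =====
-- stated objective: idiomatic
-- what changed: Replaces the right-to-left while/pop loop with a deferred double_dot_count counter by a single left-to-right walk keeping an explicit directory stack (push a name, pop on '..'), the standard way '..' resolution is written; Pre_ excludes only inputs where both raise AssertionError (a '..' with nothing before it to cancel).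
import Mathlib
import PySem

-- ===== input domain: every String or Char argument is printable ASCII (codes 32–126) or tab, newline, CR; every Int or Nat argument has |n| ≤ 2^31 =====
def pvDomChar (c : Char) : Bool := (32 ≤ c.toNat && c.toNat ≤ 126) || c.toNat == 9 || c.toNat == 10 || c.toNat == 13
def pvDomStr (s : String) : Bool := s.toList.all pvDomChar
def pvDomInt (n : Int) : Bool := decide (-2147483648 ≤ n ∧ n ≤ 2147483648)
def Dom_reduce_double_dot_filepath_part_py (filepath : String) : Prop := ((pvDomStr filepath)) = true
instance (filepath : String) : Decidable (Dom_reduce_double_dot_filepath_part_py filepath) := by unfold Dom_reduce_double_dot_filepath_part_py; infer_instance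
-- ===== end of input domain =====

-- B resolves '..' with a left-to-right directory stack instead of A's right-to-left
-- counter loop (idiomatic, same cost); equal on Pre_, which excludes exactly the
-- inputs where the Python (both A and B) raises AssertionError.

-- ===== PORT A =====
-- A's while loop: Python pops from the right, so the list is carried here already
-- reversed (head = rightmost remaining part).  The failed `assert` (AssertionError)
-- is modeled as `none`; Pre_ excludes exactly those inputs.
def pvAGo : List String → Nat → List String → Option (List String)
  | [], _, new_parts => some new_parts
  | part :: parts, double_dot_count, new_parts =>
    if part = ".." then
      if double_dot_count + 1 ≤ parts.length then
        pvAGo parts (double_dot_count + 1) new_parts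
      else none  -- assert double_dot_count <= len(parts) fails: AssertionError
    else if double_dot_count ≠ 0 then
      pvAGo parts (double_dot_count - 1) new_parts
    else
      pvAGo parts double_dot_count (new_parts ++ [part])

def reduce_double_dot_filepath_part_py (filepath : String) : String :=
  -- parts = filepath.split('/'): split? is none only for an empty separator, so getD [] never fires.
  -- parts.pop(): split never yields an empty list, so the `none` branch below is unreachable.
  match ((PySem.Str.split? filepath "/").getD []).getLast? with
  | none => ""
  | some filename =>
    match pvAGo ((PySem.Str.split? filepath "/").getD []).dropLast.reverse 0 [filename] with
    | none => ""  -- AssertionError (outside Pre_)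
    | some new_parts => PySem.Str.join "/" new_parts.reverse

-- ===== PORT B =====
-- B's for loop over parts[:-1]; `assert stack; stack.pop()` raises AssertionError on
-- an empty stack (outside Pre_), modeled here by dropLast [] = [].
def pvBStack (pref : List String) : List String :=
  pref.foldl (fun stack part => if part = ".." then stack.dropLast else stack ++ [part]) []

def reduce_double_dot_filepath_part_py_alt (filepath : String) : String :=
  -- parts = filepath.split('/'); filename = parts[-1] (the `none` branch is unreachable)
  match ((PySem.Str.split? filepath "/").getD []).getLast? with
  | none => ""
  | some filename =>
    PySem.Str.join "/" (pvBStack ((PySem.Str.split? filepath "/").getD []).dropLast ++ [filename])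

-- ===== PRECONDITION & SPEC =====
-- Pre_ excludes exactly the inputs on which Python A raises AssertionError: some
-- initial segment of the prefix parts (all parts before the filename) contains more
-- '..' entries than other entries.
def Pre_reduce_double_dot_filepath_part_py (filepath : String) : Prop :=
  ∀ j < ((PySem.Str.split? filepath "/").getD []).dropLast.length + 1,
    2 * ((((PySem.Str.split? filepath "/").getD []).dropLast.take j).count "..") ≤ j
instance (filepath : String) : Decidable (Pre_reduce_double_dot_filepath_part_py filepath) := by unfold Pre_reduce_double_dot_filepath_part_py; infer_instance

def pvWitness_reduce_double_dot_filepath_part_py : String := "a/b/../c/x.txt"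

def Spec_reduce_double_dot_filepath_part_py (filepath : String) (out : String) : Prop := out = reduce_double_dot_filepath_part_py_alt filepath
instance (filepath : String) (out : String) : Decidable (Spec_reduce_double_dot_filepath_part_py filepath out) := by unfold Spec_reduce_double_dot_filepath_part_py; infer_instance

-- ===== CLAIM (what is proved, stated in full; the proofs are below) =====
def Claim_equal_reduce_double_dot_filepath_part_py : Prop := ∀ (filepath : String), Dom_reduce_double_dot_filepath_part_py filepath → Pre_reduce_double_dot_filepath_part_py filepath → Spec_reduce_double_dot_filepath_part_py filepath (reduce_double_dot_filepath_part_py filepath)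

-- ===== LEMMAS AND PROOFS =====

-- drop the last c elements
def pvDropN (c : Nat) (ys : List String) : List String := ys.take (ys.length - c)

theorem pvDropN_zero (ys : List String) : pvDropN 0 ys = ys := by
  simp [pvDropN]

theorem pvDropN_dropLast (c : Nat) (ys : List String) :
    pvDropN c ys.dropLast = pvDropN (c + 1) ys := by
  simp [pvDropN, List.dropLast_eq_take, List.take_take]
  omega

theorem pvDropN_append (c : Nat) (hc : 1 ≤ c) (ys : List String) (x : String) :
    pvDropN c (ys ++ [x]) = pvDropN (c - 1) ys := by
  unfold pvDropN
  rw [List.take_append_of_le_length (by simp; omega)]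
  simp only [List.length_append, List.length_cons, List.length_nil]
  congr 1
  omega

-- "every assert of A's loop passes", as a structural predicate on the reversed prefix
def pvPass : List String → Nat → Prop
  | [], _ => True
  | part :: parts, c =>
    if part = ".." then c + 1 ≤ parts.length ∧ pvPass parts (c + 1) else pvPass parts (c - 1)

-- A's right-to-left counter loop computes B's stack (minus the pending pops)
theorem pvAGo_eq (rl : List String) : ∀ (c : Nat) (acc : List String), pvPass rl c →
    pvAGo rl c acc = some (acc ++ (pvDropN c (pvBStack rl.reverse)).reverse) := by
  induction rl with
  | nil => intro c acc _; simp [pvAGo, pvBStack, pvDropN]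
  | cons x rt ih =>
    intro c acc hp
    have hfold : pvBStack ((x :: rt).reverse) =
        (if x = ".." then (pvBStack rt.reverse).dropLast else pvBStack rt.reverse ++ [x]) := by
      simp [pvBStack, List.foldl_append]
    by_cases hx : x = ".."
    · simp only [pvPass, if_pos hx] at hp
      rw [hfold, if_pos hx, pvDropN_dropLast]
      simp only [pvAGo, if_pos hx, if_pos hp.1]
      exact ih (c + 1) acc hp.2
    · simp only [pvPass, if_neg hx] at hp
      rw [hfold, if_neg hx]
      by_cases hc : c = 0
      · subst hc
        simp only [pvAGo, if_neg (by omega)]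
        rw [ih 0 (acc ++ [x]) hp, pvDropN_zero, pvDropN_zero]
        simp
      · simp only [pvAGo, if_neg hx, if_pos hc]
        rw [ih (c - 1) acc (by simpa using hp), pvDropN_append c (by omega)]

-- the balance condition (Pre_) implies every assert of A's loop passes
theorem pvPass_of_balanced (rl : List String) : ∀ (c : Nat),
    (∀ j ≤ rl.length, 2 * ((rl.reverse.take j).count "..") ≤ j) →
    c + 2 * rl.count ".." ≤ rl.length → pvPass rl c := by
  induction rl with
  | nil => intro c _ _; trivial
  | cons x rt ih =>
    intro c h1 h2
    have h1' : ∀ j ≤ rt.length, 2 * ((rt.reverse.take j).count "..") ≤ j := by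
      intro j hj
      have := h1 j (by simp; omega)
      rwa [List.reverse_cons, List.take_append_of_le_length (by simpa using hj)] at this
    by_cases hx : x = ".."
    · subst hx
      have hcnt : (".." :: rt).count ".." = rt.count ".." + 1 := by
        simp
      rw [hcnt] at h2
      simp only [List.length_cons] at h2
      simp only [pvPass]
      exact ⟨by omega, ih (c + 1) h1' (by omega)⟩
    · simp only [pvPass, if_neg hx]
      have hcnt : (x :: rt).count ".." = rt.count ".." := by
        simp [hx]
      rw [hcnt] at h2
      simp only [List.length_cons] at h2
      by_cases hc : c = 0
      · subst hc
        have := h1' rt.length le_rfl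
        rw [List.take_of_length_le (by simp)] at this
        rw [List.count_reverse] at this
        exact ih 0 h1' (by omega)
      · exact ih (c - 1) h1' (by omega)

-- ===== VERDICT (by name: the statement is the Claim_ definition above) =====
theorem reduce_double_dot_filepath_part_py_spec : Claim_equal_reduce_double_dot_filepath_part_py := by
  intro filepath _ hpre
  unfold Spec_reduce_double_dot_filepath_part_py
  unfold Pre_reduce_double_dot_filepath_part_py at hpre
  unfold reduce_double_dot_filepath_part_py reduce_double_dot_filepath_part_py_alt
  set parts := (PySem.Str.split? filepath "/").getD [] with hparts
  cases hlast : parts.getLast? with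
  | none => rfl
  | some filename =>
    have hbal : ∀ j ≤ parts.dropLast.reverse.length,
        2 * ((parts.dropLast.reverse.reverse.take j).count "..") ≤ j := by
      intro j hj
      rw [List.reverse_reverse]
      exact hpre j (by rw [List.length_reverse] at hj; omega)
    have hcnt : 0 + 2 * (parts.dropLast.reverse.count "..") ≤ parts.dropLast.reverse.length := by
      have := hpre parts.dropLast.length (by omega)
      rw [List.take_of_length_le le_rfl] at this
      simpa [List.count_reverse] using this
    have hp := pvPass_of_balanced parts.dropLast.reverse 0 hbal hcnt
    simp only [pvAGo_eq parts.dropLast.reverse 0 [filename] hp, pvDropN_zero]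
    simp
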